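-- pv_equiv track=rewrite | github.com/klima7/Pol-Spider | app/src/gui/tabs/clarification.py | convert_name_to_sem
-- ===== SOURCE A (Python) =====
-- def convert_name_to_sem(name):
--     if len(name) == 0:
--         return name
--
--     sem_name = name[0]
--
--     for letter in name[1:]:
--         prev_letter = sem_name[-1]
--         if prev_letter.islower() and letter.isupper():
--             sem_name += ' '
--         sem_name += letter
--
--     sem_name = sem_name.replace('_', ' ').lower()
--
--     return sem_name
-- ===== SOURCE B (Python) =====
-- def convert_name_to_sem(name):
--     # Staged: compute cut indices, slice into segments, join with spaces.
--     n = len(name)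
--     cuts = [i for i in range(1, n) if name[i-1].islower() and name[i].isupper()]
--     parts = [name[a:b] for a, b in zip([0] + cuts, cuts + [n])]
--     return ' '.join(parts).replace('_', ' ').lower()
-- ===== Notes on version B (the rewrite author's own statement) =====
-- stated objective: alternative
-- what changed: Replaced A's single growing-accumulator loop (which re-reads the accumulator's last character each step) by a staged computation: first collect the cut indices where a lowercase char precedes an uppercase one, then slice the name into segments at those cuts and join them with spaces, then the same underscore-to-space replacement and lowercasing.
import Mathlib
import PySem

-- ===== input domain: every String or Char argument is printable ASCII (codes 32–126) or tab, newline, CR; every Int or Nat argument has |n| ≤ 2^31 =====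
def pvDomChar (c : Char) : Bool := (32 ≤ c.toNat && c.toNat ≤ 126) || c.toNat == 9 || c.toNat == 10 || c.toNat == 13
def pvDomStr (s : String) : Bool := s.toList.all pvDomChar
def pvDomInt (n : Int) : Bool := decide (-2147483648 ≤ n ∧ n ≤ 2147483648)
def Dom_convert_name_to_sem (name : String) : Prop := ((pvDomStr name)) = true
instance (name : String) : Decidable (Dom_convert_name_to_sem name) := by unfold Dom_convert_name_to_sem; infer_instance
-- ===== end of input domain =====

-- B replaces A's growing accumulator loop by a staged computation (cut indices, then slices, then join); objective: simpler.

-- ===== PORT A =====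
-- one loop step: prev_letter = sem_name[-1] (sem_name is nonempty throughout), conditional space, append letter
def convertStepA (acc : List Char) (letter : Char) : List Char :=
  if PySem.Chars.islower (acc.getLastD ' ') && PySem.Chars.isupper letter then
    acc ++ [' ', letter]
  else
    acc ++ [letter]

def convert_name_to_sem (name : String) : String :=
  if name.toList.length = 0 then name
  else
    let cs := name.toList
    -- sem_name = name[0]; for letter in name[1:]: …
    let sem := (PySem.List.slice cs (some 1) none).foldl convertStepA (cs.take 1)
    PySem.Str.lower (PySem.Str.replace (String.ofList sem) "_" " ")

-- ===== PORT B =====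
def convert_name_to_sem_alt (name : String) : String :=
  let cs := name.toList
  let n : Int := cs.length
  -- cuts = [i for i in range(1, n) if name[i-1].islower() and name[i].isupper()]
  -- (the indices i-1 and i are always in range here, so plain indexing is pyGetD with a dummy default)
  let cuts := (PySem.List.pyRange 1 n 1).filter (fun i =>
      PySem.Chars.islower (PySem.List.pyGetD cs (i - 1) ' ') &&
      PySem.Chars.isupper (PySem.List.pyGetD cs i ' '))
  -- parts = [name[a:b] for a, b in zip([0] + cuts, cuts + [n])]
  let parts := ((0 :: cuts).zip (cuts ++ [n])).map (fun ab => PySem.List.slice cs (some ab.1) (some ab.2))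
  PySem.Str.lower (PySem.Str.replace (String.ofList (List.intercalate [' '] parts)) "_" " ")

-- ===== PRECONDITION & SPEC =====
def Spec_convert_name_to_sem (name : String) (out : String) : Prop := out = convert_name_to_sem_alt name
instance (name : String) (out : String) : Decidable (Spec_convert_name_to_sem name out) := by unfold Spec_convert_name_to_sem; infer_instance

-- ===== CLAIM (what is proved, stated in full; the proofs are below) =====
def Claim_equal_convert_name_to_sem : Prop := ∀ (name : String), Dom_convert_name_to_sem name → Spec_convert_name_to_sem name (convert_name_to_sem name)

-- ===== LEMMAS AND PROOFS =====

-- proof-side helpers: boundary test, recursive spec of the insertion, Nat-level cuts/parts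
def pvB (p c : Char) : Bool := PySem.Chars.islower p && PySem.Chars.isupper c
def pvG : Char → List Char → List Char
  | _, [] => []
  | p, c :: t => (if pvB p c then [' ', c] else [c]) ++ pvG c t
def pvCuts (cs : List Char) : List Nat :=
  ((List.range (cs.length - 1)).filter (fun k => pvB (cs.getD k ' ') (cs.getD (k+1) ' '))).map (· + 1)
def pvParts (cs : List Char) : List (List Char) :=
  ((0 :: pvCuts cs).zip (pvCuts cs ++ [cs.length])).map (fun ab => (cs.drop ab.1).take (ab.2 - ab.1))

lemma A_loop (rest : List Char) : ∀ (acc : List Char) (c : Char),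
    rest.foldl convertStepA (acc ++ [c]) = acc ++ c :: pvG c rest := by
  induction rest with
  | nil => intro acc c; simp [pvG]
  | cons d t ih =>
    intro acc c
    simp only [List.foldl_cons, convertStepA, List.getLastD_concat]
    by_cases h : (PySem.Chars.islower c && PySem.Chars.isupper d) = true
    · have h2 : acc ++ [c] ++ [' ', d] = (acc ++ [c, ' ']) ++ [d] := by simp
      rw [if_pos h, h2, ih]
      simp [pvG, pvB, h]
    · have h2 : acc ++ [c] ++ [d] = (acc ++ [c]) ++ [d] := by simp
      rw [if_neg h, h2, ih]
      simp [pvG, pvB, h]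

lemma pvCuts_cons (c d : Char) (t : List Char) :
    pvCuts (c :: d :: t) = (if pvB c d then [1] else []) ++ (pvCuts (d :: t)).map (· + 1) := by
  simp only [pvCuts, List.length_cons, Nat.add_sub_cancel, List.range_succ_eq_map,
    List.filter_cons, List.filter_map, Function.comp_def, List.getD_cons_succ, List.getD_cons_zero,
    List.map_map]
  by_cases h : pvB c d <;> simp [h, Function.comp_def, Nat.succ_eq_add_one]

lemma intercalate_head (c : Char) (s : List Char) (rest : List (List Char)) :
    List.intercalate [' '] ((c :: s) :: rest) = c :: List.intercalate [' '] (s :: rest) := by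
  cases rest <;> simp [List.intercalate]

lemma intercalate_cons_of_ne (x : List Char) (rest : List (List Char)) (h : rest ≠ []) :
    List.intercalate [' '] (x :: rest) = x ++ ' ' :: List.intercalate [' '] rest := by
  cases rest with
  | nil => simp at h
  | cons y ys => simp [List.intercalate]

lemma shift_slices (c : Char) (cs2 : List Char) (xs ys : List Nat) :
    ((xs.map (· + 1)).zip (ys.map (· + 1))).map
        (fun ab => ((c :: cs2).drop ab.1).take (ab.2 - ab.1))
      = (xs.zip ys).map (fun ab => (cs2.drop ab.1).take (ab.2 - ab.1)) := by
  rw [List.zip_map, List.map_map]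
  refine List.map_congr_left (fun ab _ => ?_)
  simp [Function.comp, Prod.map]

lemma zipslice_boundary (c : Char) (cs2 : List Char) (ns : List Nat) (N : Nat) :
    ((0 :: 1 :: ns.map (· + 1)).zip ((1 :: ns.map (· + 1)) ++ [N + 1])).map
        (fun ab => ((c :: cs2).drop ab.1).take (ab.2 - ab.1))
      = [c] :: ((0 :: ns).zip (ns ++ [N])).map (fun ab => (cs2.drop ab.1).take (ab.2 - ab.1)) := by
  have e1 : ((1 :: ns.map (· + 1)) ++ [N + 1]) = 1 :: ((ns ++ [N]).map (· + 1)) := by simp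
  rw [e1, List.zip_cons_cons, List.map_cons]
  have e2 : (1 : Nat) :: ns.map (· + 1) = (0 :: ns).map (· + 1) := by simp
  rw [e2, shift_slices]
  simp

lemma zipslice_noboundary (c : Char) (cs2 : List Char) (k : Nat) (ks : List Nat) (N : Nat) :
    ((0 :: (k+1) :: ks.map (· + 1)).zip (((k+1) :: ks.map (· + 1)) ++ [N + 1])).map
        (fun ab => ((c :: cs2).drop ab.1).take (ab.2 - ab.1))
      = (c :: cs2.take k) :: ((k :: ks).zip (ks ++ [N])).map (fun ab => (cs2.drop ab.1).take (ab.2 - ab.1)) := by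
  have e1 : (((k+1) :: ks.map (· + 1)) ++ [N + 1]) = (k+1) :: ((ks ++ [N]).map (· + 1)) := by simp
  rw [e1, List.zip_cons_cons, List.map_cons]
  have e2 : (k+1) :: ks.map (· + 1) = (k :: ks).map (· + 1) := by simp
  rw [e2, shift_slices]
  simp

lemma B_main : ∀ (t : List Char) (c : Char),
    List.intercalate [' '] (pvParts (c :: t)) = c :: pvG c t := by
  intro t
  induction t with
  | nil => intro c; simp [pvParts, pvCuts, pvG, List.intercalate]
  | cons d t' ih =>
    intro c
    by_cases hb : pvB c d
    · have e : pvParts (c :: d :: t') = [c] :: pvParts (d :: t') := by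
        show ((0 :: pvCuts (c :: d :: t')).zip (pvCuts (c :: d :: t') ++ [(c :: d :: t').length])).map _ = _
        rw [pvCuts_cons]
        simp only [hb, if_true, List.singleton_append, List.length_cons]
        exact zipslice_boundary c (d :: t') (pvCuts (d :: t')) (d :: t').length
      rw [e, intercalate_cons_of_ne _ _ (by simp [pvParts]), ih]
      simp [pvG, hb]
    · cases hns : pvCuts (d :: t') with
      | nil =>
        have e : pvParts (c :: d :: t') = [c :: d :: t'] := by
          simp [pvParts, pvCuts_cons, hb, hns]
        have h2 : d :: pvG d t' = d :: t' := by
          have := ih d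
          simp [pvParts, hns, List.intercalate] at this
          simpa using this.symm
        rw [e]
        simp [List.intercalate, pvG, hb, ← h2]
      | cons k ks =>
        have e : pvParts (c :: d :: t') =
            (c :: (d :: t').take k) ::
              ((k :: ks).zip (ks ++ [(d :: t').length])).map
                (fun ab => ((d :: t').drop ab.1).take (ab.2 - ab.1)) := by
          show ((0 :: pvCuts (c :: d :: t')).zip (pvCuts (c :: d :: t') ++ [(c :: d :: t').length])).map _ = _
          rw [pvCuts_cons]
          simp only [hb, hns, List.map_cons, List.length_cons]
          exact zipslice_noboundary c (d :: t') k ks (d :: t').length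
        have e2 : pvParts (d :: t') =
            ((d :: t').take k) ::
              ((k :: ks).zip (ks ++ [(d :: t').length])).map
                (fun ab => ((d :: t').drop ab.1).take (ab.2 - ab.1)) := by
          simp [pvParts, hns]
        rw [e, intercalate_head, ← e2, ih]
        simp [pvG, hb]

lemma B_parts (cs : List Char) :
    ((0 :: (PySem.List.pyRange 1 (cs.length : Int) 1).filter (fun i =>
        PySem.Chars.islower (PySem.List.pyGetD cs (i - 1) ' ') &&
        PySem.Chars.isupper (PySem.List.pyGetD cs i ' '))).zip
      ((PySem.List.pyRange 1 (cs.length : Int) 1).filter (fun i =>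
        PySem.Chars.islower (PySem.List.pyGetD cs (i - 1) ' ') &&
        PySem.Chars.isupper (PySem.List.pyGetD cs i ' ')) ++ [(cs.length : Int)])).map
      (fun ab => PySem.List.slice cs (some ab.1) (some ab.2)) = pvParts cs := by
  have hcuts : (PySem.List.pyRange 1 (cs.length : Int) 1).filter (fun i =>
        PySem.Chars.islower (PySem.List.pyGetD cs (i - 1) ' ') &&
        PySem.Chars.isupper (PySem.List.pyGetD cs i ' '))
      = (pvCuts cs).map (Nat.cast : Nat → Int) := by
    rw [PySem.List.pyRange_one, List.filter_map]
    have htn : ((cs.length : Int) - 1).toNat = cs.length - 1 := by omega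
    rw [htn]
    unfold pvCuts
    rw [List.map_map]
    have hf : ((Nat.cast : Nat → Int) ∘ fun x => x + 1) = fun k : Nat => 1 + (k : Int) := by
      funext k; simp [Function.comp]; ring
    rw [hf]
    congr 1
    apply List.filter_congr
    intro k _
    have h1 : (1 : Int) + (k : Int) - 1 = (k : Int) := by ring
    have h3 : PySem.List.pyGetD cs (1 + (k : Int)) ' ' = cs.getD (k + 1) ' ' := by
      rw [show (1 + (k : Int)) = ((k + 1 : Nat) : Int) by push_cast; ring, PySem.List.pyGetD_natCast]
    simp [Function.comp, h1, h3, PySem.List.pyGetD_natCast, pvB]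
  rw [hcuts]
  have h0 : (0 : Int) :: (pvCuts cs).map (Nat.cast : Nat → Int) = ((0 :: pvCuts cs).map (Nat.cast : Nat → Int)) := by simp
  have h1 : (pvCuts cs).map (Nat.cast : Nat → Int) ++ [(cs.length : Int)] = ((pvCuts cs ++ [cs.length]).map (Nat.cast : Nat → Int)) := by simp
  rw [h0, h1, List.zip_map, List.map_map]
  unfold pvParts
  apply List.map_congr_left
  intro ab _
  simp [Function.comp, Prod.map, PySem.List.slice_natCast]

-- ===== VERDICT (by name: the statement is the Claim_ definition above) =====
theorem convert_name_to_sem_spec : Claim_equal_convert_name_to_sem := by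
  intro name _
  unfold Spec_convert_name_to_sem convert_name_to_sem convert_name_to_sem_alt
  cases hcs : name.toList with
  | nil =>
    have hname : name = "" := by
      have := congrArg String.ofList hcs
      simpa using this
    subst hname
    decide
  | cons c t =>
    rw [if_neg (by simp : ¬(c :: t).length = 0)]
    have hslice : PySem.List.slice (c :: t) (some 1) none = t := by
      simp [PySem.List.slice_from]
    have hl := A_loop t [] c
    simp only [List.nil_append] at hl
    simp only [hslice, B_parts, B_main, List.take_succ_cons, List.take_zero, hl]
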